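-- pv_equiv track=rewrite | github.com/imbilalist/imbilalist.github.io | Calculator/presentation.py | generate_functions
-- ===== SOURCE A (Python) =====
-- def generate_functions(n):
--     """
--     Generate all functions f: {1,...,n} -> {0,...,n-1} satisfying:
--     - f(1) = 0
--     - f(x) >= 1 for x = 2,...,n
--     - ∃ l ∈ {3,...,n} such that f(l) = 1
--     - For all x = 1,...,n-1: f(x+1) ≤ f(x) or f(x+1) = f(x)+1
--     """
--     if n < 3:
--         return []          # need at least n=3 to have l in {3,...,n}
--     results = []
--     f = [0] * n            # f[i] corresponds to x = i+1
--     f[0] = 0               # f(1)=0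
--     f[1] = 1               # forced by the condition at x=1 and f(2)≥1
--
--     def backtrack(i, has_one):
--         """i is current index to assign (0‑based), start at i=2 (x=3)."""
--         if i == n:
--             if has_one:
--                 results.append(f.copy())
--             return
--         prev = f[i-1]
--         # all values from 1 to prev are allowed
--         for v in range(1, prev + 1):
--             f[i] = v
--             new_one = has_one or (v == 1 and i >= 2)   # i>=2 → x≥3
--             backtrack(i + 1, new_one)
--         # also the value prev+1 if it does not exceed n-1
--         if prev + 1 <= n - 1:
--             f[i] = prev + 1
--             # prev+1 can never be 1 (since prev≥1), so has_one unchanged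
--             backtrack(i + 1, has_one)
--
--     backtrack(2, False)    # start at index 2, no 1 seen yet among x≥3
--     return results
-- ===== SOURCE B (Python) =====
-- def generate_functions(n):
--     """
--     Level-by-level (breadth-first product) enumeration: maintain the list of
--     partial prefixes in output order together with the 'has a 1 at x>=3' flag,
--     extend every prefix by all allowed next values, and keep finished
--     assignments whose flag is set.
--     """
--     if n < 3:
--         return []
--     states = [([0, 1], False)]
--     for _ in range(2, n):
--         new_states = []
--         for f, h in states:
--             prev = f[-1]
--             for v in range(1, prev + 1):
--                 new_states.append((f + [v], h or v == 1))
--             if prev + 1 <= n - 1: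
--                 new_states.append((f + [prev + 1], h))
--         states = new_states
--     return [f for f, h in states if h]
-- ===== Notes on version B (the rewrite author's own statement) =====
-- stated objective: alternative
-- what changed: Replaces the recursive backtracking over a shared mutable array by an iterative level-by-level (breadth-first product) construction: a list of (prefix, has_one) states is extended one index per loop iteration and finished prefixes with the flag set are kept.
import Mathlib
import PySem

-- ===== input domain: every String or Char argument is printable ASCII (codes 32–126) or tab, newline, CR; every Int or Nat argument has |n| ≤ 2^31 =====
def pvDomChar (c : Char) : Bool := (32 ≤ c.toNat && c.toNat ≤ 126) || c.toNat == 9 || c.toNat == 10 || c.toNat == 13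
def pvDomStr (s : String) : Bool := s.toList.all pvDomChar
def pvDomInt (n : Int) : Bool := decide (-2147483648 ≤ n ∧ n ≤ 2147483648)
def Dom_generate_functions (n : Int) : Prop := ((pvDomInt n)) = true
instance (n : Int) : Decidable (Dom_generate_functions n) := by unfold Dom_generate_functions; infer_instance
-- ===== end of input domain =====

-- B replaces A's recursive backtracking by a level-by-level (breadth-first product)
-- extension of all partial prefixes; same output, different decomposition (objective: alternative).

-- ===== PORT A =====
-- A's recursive `backtrack` closure; `f` is the shared list, fuel bounds the recursion depth
-- (each call takes i → i+1 and i ≤ nn, so fuel nn - 1 at i = 2 suffices).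
def pvBtA (nn : Nat) (fuel : Nat) (i : Nat) (f : List Int) (hasOne : Bool) : List (List Int) :=
  match fuel with
  | 0 => []
  | fuel + 1 =>
    if i = nn then (if hasOne then [f] else []) else
      let prev := f.getD (i - 1) 0
      let acc := (PySem.List.pyRange 1 (prev + 1) 1).foldl
        (fun acc v => acc ++ pvBtA nn fuel (i + 1) (f.set i v)
            (hasOne || (v == 1 && decide (2 ≤ i)))) []
      acc ++ (if prev + 1 ≤ (nn : Int) - 1 then pvBtA nn fuel (i + 1) (f.set i (prev + 1)) hasOne else [])

def generate_functions (n : Int) : List (List Int) :=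
  if n < 3 then [] else
    let f := ((List.replicate n.toNat (0 : Int)).set 0 0).set 1 1
    pvBtA n.toNat (n.toNat - 1) 2 f false

-- ===== PORT B =====
-- one level of B's loop body: extend every (prefix, has_one) state by all allowed next values
def pvStepB (nn : Nat) (states : List (List Int × Bool)) : List (List Int × Bool) :=
  states.foldl (fun acc fh =>
    (acc ++ (PySem.List.pyRange 1 (fh.1.getD (fh.1.length - 1) 0 + 1) 1).map
        (fun v => (fh.1 ++ [v], fh.2 || v == 1)))
      ++ (if fh.1.getD (fh.1.length - 1) 0 + 1 ≤ (nn : Int) - 1 then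
            [(fh.1 ++ [fh.1.getD (fh.1.length - 1) 0 + 1], fh.2)] else [])) []

def generate_functions_alt (n : Int) : List (List Int) :=
  if n < 3 then [] else
    (((PySem.List.pyRange 2 n 1).foldl (fun sts _ => pvStepB n.toNat sts)
        [([0, 1], false)]).filter (·.2)).map (·.1)

-- ===== PRECONDITION & SPEC =====
def Spec_generate_functions (n : Int) (out : List (List Int)) : Prop := out = generate_functions_alt n
instance (n : Int) (out : List (List Int)) : Decidable (Spec_generate_functions n out) := by unfold Spec_generate_functions; infer_instance

-- ===== CLAIM (what is proved, stated in full; the proofs are below) =====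
def Claim_equal_generate_functions : Prop := ∀ (n : Int), Dom_generate_functions n → Spec_generate_functions n (generate_functions n)

-- ===== LEMMAS AND PROOFS =====

-- the final `[f for f, h in states if h]`
def pvExtract (sts : List (List Int × Bool)) : List (List Int) := (sts.filter (·.2)).map (·.1)

-- per-state children of one level
def pvChilds (nn : Nat) (fh : List Int × Bool) : List (List Int × Bool) :=
  (PySem.List.pyRange 1 (fh.1.getD (fh.1.length - 1) 0 + 1) 1).map
      (fun v => (fh.1 ++ [v], fh.2 || v == 1))
    ++ (if fh.1.getD (fh.1.length - 1) 0 + 1 ≤ (nn : Int) - 1 then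
          [(fh.1 ++ [fh.1.getD (fh.1.length - 1) 0 + 1], fh.2)] else [])

theorem pvStepB_eq (nn : Nat) (sts : List (List Int × Bool)) :
    pvStepB nn sts = sts.flatMap (pvChilds nn) := by
  unfold pvStepB
  have aux : ∀ (init : List (List Int × Bool)),
      sts.foldl (fun acc fh =>
        (acc ++ (PySem.List.pyRange 1 (fh.1.getD (fh.1.length - 1) 0 + 1) 1).map
            (fun v => (fh.1 ++ [v], fh.2 || v == 1)))
          ++ (if fh.1.getD (fh.1.length - 1) 0 + 1 ≤ (nn : Int) - 1 then
                [(fh.1 ++ [fh.1.getD (fh.1.length - 1) 0 + 1], fh.2)] else [])) init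
      = init ++ sts.flatMap (pvChilds nn) := by
    induction sts with
    | nil => simp
    | cons a t ih =>
      intro init
      rw [List.foldl_cons, ih]
      simp only [List.flatMap_cons, pvChilds, List.append_assoc]
  simpa using aux []

theorem pvStepB_nil (nn : Nat) : pvStepB nn [] = [] := rfl

theorem pvIter_nil (nn k : Nat) : (pvStepB nn)^[k] ([] : List (List Int × Bool)) = [] := by
  induction k with
  | zero => rfl
  | succ k ih => rw [Function.iterate_succ_apply, pvStepB_nil, ih]

theorem pvStepB_append (nn : Nat) (a b : List (List Int × Bool)) :
    pvStepB nn (a ++ b) = pvStepB nn a ++ pvStepB nn b := by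
  simp [pvStepB_eq]

theorem pvIter_append (nn k : Nat) (a b : List (List Int × Bool)) :
    (pvStepB nn)^[k] (a ++ b) = (pvStepB nn)^[k] a ++ (pvStepB nn)^[k] b := by
  induction k generalizing a b with
  | zero => rfl
  | succ k ih => simp [Function.iterate_succ_apply, pvStepB_append, ih]

theorem pvExtract_append (a b : List (List Int × Bool)) :
    pvExtract (a ++ b) = pvExtract a ++ pvExtract b := by
  simp [pvExtract]

theorem pvExtract_iter_flatMap (nn k : Nat) (sts : List (List Int × Bool)) :
    pvExtract ((pvStepB nn)^[k] sts) = sts.flatMap (fun s => pvExtract ((pvStepB nn)^[k] [s])) := by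
  induction sts with
  | nil => simp [pvIter_nil, pvExtract]
  | cons a t ih =>
    have h1 : (a :: t) = [a] ++ t := rfl
    rw [h1, pvIter_append, pvExtract_append, ih]; rfl

theorem pvFoldl_const (g : List (List Int × Bool) → List (List Int × Bool))
    (l : List Int) (init : List (List Int × Bool)) :
    l.foldl (fun sts _ => g sts) init = g^[l.length] init := by
  induction l generalizing init with
  | nil => rfl
  | cons a t ih => simp [List.foldl_cons, ih, Function.iterate_succ_apply]

theorem pvSet_mid (p : List Int) (j0 : Int) (jr : List Int) (v : Int) :
    (p ++ j0 :: jr).set p.length v = (p ++ [v]) ++ jr := by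
  simp

-- main bridge: A's backtrack from a prefix p (with junk to be overwritten behind it)
-- equals B's remaining levels run from the single state (p, h)
theorem pvMain (nn : Nat) (junk : List Int) : ∀ (p : List Int) (i : Nat) (h : Bool),
    2 ≤ i → p.length = i → i + junk.length = nn →
    pvBtA nn (junk.length + 1) i (p ++ junk) h
      = pvExtract ((pvStepB nn)^[junk.length] [(p, h)]) := by
  induction junk with
  | nil =>
    intro p i h h2 hp hn
    simp only [List.length_nil, Nat.add_zero] at hn
    subst hn
    cases h <;> simp [pvBtA, pvExtract]
  | cons j0 jr ih =>
    intro p i h h2 hp hn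
    simp only [List.length_cons] at hn ⊢
    have hi : i ≠ nn := by omega
    have hidx : (p ++ j0 :: jr).getD (i - 1) 0 = p.getD (i - 1) 0 :=
      List.getD_append p _ 0 (i - 1) (by omega)
    rw [pvBtA]
    simp only [hi, if_false, hidx]
    have hset : ∀ v : Int, (p ++ j0 :: jr).set i v = (p ++ [v]) ++ jr := by
      intro v; rw [← hp]; exact pvSet_mid p j0 jr v
    rw [PySem.List.foldl_append_eq_flatMap
      (fun v => pvBtA nn (jr.length + 1) (i + 1) ((p ++ j0 :: jr).set i v)
        (h || (v == 1 && decide (2 ≤ i)))) _ []]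
    rw [Function.iterate_succ_apply]
    have hstep1 : pvStepB nn [(p, h)] = pvChilds nn (p, h) := by
      simp [pvStepB_eq]
    rw [hstep1]
    unfold pvChilds
    simp only [hp]
    rw [pvIter_append, pvExtract_append,
      pvExtract_iter_flatMap nn jr.length, List.flatMap_map]
    simp only [List.nil_append]
    congr 1
    · apply List.flatMap_congr
      intro v hv
      have h2' : decide (2 ≤ i) = true := by simpa using h2
      rw [hset v, h2']
      simp only [Bool.and_true]
      exact ih (p ++ [v]) (i + 1) (h || (v == 1)) (by omega) (by simp [hp]) (by omega)
    · by_cases hc : p.getD (i - 1) 0 + 1 ≤ (nn : Int) - 1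
      · rw [if_pos hc, if_pos hc, hset (p.getD (i - 1) 0 + 1)]
        exact ih (p ++ [p.getD (i - 1) 0 + 1]) (i + 1) h (by omega) (by simp [hp]) (by omega)
      · rw [if_neg hc, if_neg hc, pvIter_nil]
        rfl

-- ===== VERDICT (by name: the statement is the Claim_ definition above) =====
theorem generate_functions_spec : Claim_equal_generate_functions := by
  intro n _
  unfold Spec_generate_functions generate_functions generate_functions_alt
  by_cases hn : n < 3
  · simp [hn]
  · simp only [hn, if_false]
    push Not at hn
    have h3 : 3 ≤ n.toNat := by omega
    set nn := n.toNat with hnn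
    have hf : ((List.replicate nn (0 : Int)).set 0 0).set 1 1
        = ([0, 1] : List Int) ++ List.replicate (nn - 2) 0 := by
      have : nn = (nn - 2) + 2 := by omega
      rw [this]
      simp [List.replicate_succ]
    have hlen : (PySem.List.pyRange 2 n 1).length = nn - 2 := by
      rw [PySem.List.length_pyRange_one]; omega
    rw [hf, pvFoldl_const, hlen]
    have hmain := pvMain nn (List.replicate (nn - 2) 0) [0, 1] 2 false (by omega) (by simp)
      (by simp; omega)
    simp only [List.length_replicate] at hmain
    have hfuel : nn - 1 = (nn - 2) + 1 := by omega
    rw [hfuel, hmain]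
    rfl
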